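-- pv_equiv track=rewrite | github.com/AriaDesta2083/Forecasting | trash/FTSCheng.py | FuzzyLogicRelation
-- ===== SOURCE A (Python) =====
-- def FuzzyLogicRelation(kelompok, kelas, data):
--     # Menginisialisasi array baru untuk kelompok
--     fuzzifikasi = []
--     hubflr = []
--     # Mengelompokkan nilai dalam data berdasarkan kelompok
--     for nilai in data:
--         for i, k in enumerate(kelompok):
--             if nilai < k:
--                 fuzzifikasi.append(kelas[i])
--                 hubflr.append(kelas[i])
--                 break
--     del hubflr[-1]
--     hubflr.insert(0, "-")
--     return fuzzifikasi, hubflr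
-- ===== SOURCE B (Python) =====
-- def FuzzyLogicRelation(kelompok, kelas, data):
--     # Staircase of prefix-maximum records: the only boundaries a first-match
--     # scan can stop at, strictly increasing, so binary search applies.
--     records = []
--     best = None
--     for i, k in enumerate(kelompok):
--         if best is None or k > best:
--             records.append((k, i))
--             best = k
--     fuzzifikasi = []
--     for nilai in data:
--         # binary search for the first record whose boundary exceeds nilai
--         lo, hi = 0, len(records)
--         while lo < hi:
--             mid = (lo + hi) // 2
--             if nilai < records[mid][0]:
--                 hi = mid
--             else:
--                 lo = mid + 1
--         if lo < len(records):
--             fuzzifikasi.append(kelas[records[lo][1]])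
--     hubflr = ["-"] + fuzzifikasi[:-1]
--     return fuzzifikasi, hubflr
-- ===== Notes on version B (the rewrite author's own statement) =====
-- stated objective: faster
-- what changed: B precomputes the strictly increasing staircase of prefix-maximum boundaries of kelompok once and classifies each data value by binary search over it (and builds hubflr by slicing instead of append/del/insert), replacing A's per-value linear scan of kelompok.
import Mathlib
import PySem

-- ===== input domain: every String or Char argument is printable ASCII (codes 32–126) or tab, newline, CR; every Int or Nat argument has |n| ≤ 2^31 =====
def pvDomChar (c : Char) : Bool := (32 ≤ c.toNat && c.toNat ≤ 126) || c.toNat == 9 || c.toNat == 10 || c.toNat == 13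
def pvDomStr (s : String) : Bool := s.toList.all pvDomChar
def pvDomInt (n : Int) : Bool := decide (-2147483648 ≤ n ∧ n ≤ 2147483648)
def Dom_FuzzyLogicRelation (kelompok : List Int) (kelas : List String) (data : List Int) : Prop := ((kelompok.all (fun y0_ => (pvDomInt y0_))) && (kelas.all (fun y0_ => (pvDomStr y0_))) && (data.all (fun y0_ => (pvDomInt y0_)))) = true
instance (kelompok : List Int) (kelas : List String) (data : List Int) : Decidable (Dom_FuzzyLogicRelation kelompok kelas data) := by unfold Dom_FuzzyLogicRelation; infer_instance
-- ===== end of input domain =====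

-- B replaces A's inner linear scan over kelompok by a binary search over the
-- strictly increasing "prefix-maximum" boundaries of kelompok (alternative algorithm,
-- asymptotically fewer comparisons); return values agree on all of Pre_.

-- ===== PORT A =====
-- inner `for i, k in enumerate(kelompok): if nilai < k: … break` — first index i with nilai < k
def firstIdxA (x : Int) : List Int → Nat → Option Nat
  | [], _ => none
  | k :: ks, i => if x < k then some i else firstIdxA x ks (i + 1)

-- hubflr receives exactly the same appends as fuzzifikasi, so one list is threaded for both
def FuzzyLogicRelation (kelompok : List Int) (kelas : List String) (data : List Int) : List String × List String :=
  let fuzzifikasi : List String := data.foldl (fun l nilai =>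
    match firstIdxA nilai kelompok 0 with
    | none => l                        -- inner loop finds no k: nothing appended
    | some i => l ++ [kelas.getD i ""] -- kelas[i]; i ≥ len(kelas) raises IndexError in Python (excluded by Pre_)
    ) []
  -- `del hubflr[-1]` raises IndexError on the empty list in Python (excluded by Pre_); then insert "-" at 0
  (fuzzifikasi, "-" :: fuzzifikasi.dropLast)

-- ===== PORT B =====
-- first loop of Source B: staircase of prefix-maximum records (boundary, original index)
def recordsGo (ks : List Int) (i : Nat) (best : Option Int) : List (Int × Nat) :=
  match ks with
  | [] => []
  | k :: ks' =>
    match best with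
    | none => (k, i) :: recordsGo ks' (i + 1) (some k)
    | some b => if b < k then (k, i) :: recordsGo ks' (i + 1) (some k)
                else recordsGo ks' (i + 1) (some b)

def buildRecords (kelompok : List Int) : List (Int × Nat) := recordsGo kelompok 0 none

-- Source B's `while lo < hi` binary search for the first record boundary exceeding nilai;
-- the fuel argument (hi - lo at the call site) only makes the loop structurally total,
-- it never runs out before lo = hi
def bsearchAux (recs : List (Int × Nat)) (x : Int) : Nat → Nat → Nat → Nat
  | 0, lo, _ => lo
  | n + 1, lo, hi =>
    if lo < hi then
      if x < (recs.getD ((lo + hi) / 2) (0, 0)).1 then bsearchAux recs x n lo ((lo + hi) / 2)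
      else bsearchAux recs x n ((lo + hi) / 2 + 1) hi
    else lo

def bsearch (recs : List (Int × Nat)) (x : Int) (lo hi : Nat) : Nat :=
  bsearchAux recs x (hi - lo) lo hi

def FuzzyLogicRelation_alt (kelompok : List Int) (kelas : List String) (data : List Int) : List String × List String :=
  let records := buildRecords kelompok
  let fuzzifikasi : List String := data.foldl (fun l nilai =>
    let lo := bsearch records nilai 0 records.length
    if lo < records.length then l ++ [kelas.getD (records.getD lo (0, 0)).2 ""] -- kelas[·] raises when kelas too short (excluded by Pre_)
    else l) []
  (fuzzifikasi, "-" :: fuzzifikasi.dropLast)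

-- ===== PRECONDITION & SPEC =====
-- Pre_ excludes exactly the inputs where the Python A raises IndexError: when no data
-- value lies below any kelompok boundary (so `del hubflr[-1]` hits an empty list), or when
-- some data value's first matching boundary index reaches past the end of kelas.
def Pre_FuzzyLogicRelation (kelompok : List Int) (kelas : List String) (data : List Int) : Prop :=
  (∃ nilai ∈ data, ∃ k ∈ kelompok, nilai < k) ∧
  (∀ nilai ∈ data, ∀ i, i < kelompok.length →
      (nilai < kelompok.getD i 0 ∧ ∀ j, j < i → kelompok.getD j 0 ≤ nilai) → i < kelas.length)
instance (kelompok : List Int) (kelas : List String) (data : List Int) : Decidable (Pre_FuzzyLogicRelation kelompok kelas data) := by unfold Pre_FuzzyLogicRelation; infer_instance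

def pvWitness_FuzzyLogicRelation : List Int × List String × List Int := ([3, 7], ["a", "b"], [1, 5])

def Spec_FuzzyLogicRelation (kelompok : List Int) (kelas : List String) (data : List Int) (out : List String × List String) : Prop := out = FuzzyLogicRelation_alt kelompok kelas data
instance (kelompok : List Int) (kelas : List String) (data : List Int) (out : List String × List String) : Decidable (Spec_FuzzyLogicRelation kelompok kelas data out) := by unfold Spec_FuzzyLogicRelation; infer_instance

-- ===== CLAIM (what is proved, stated in full; the proofs are below) =====
def Claim_equal_FuzzyLogicRelation : Prop := ∀ (kelompok : List Int) (kelas : List String) (data : List Int), Dom_FuzzyLogicRelation kelompok kelas data → Pre_FuzzyLogicRelation kelompok kelas data → Spec_FuzzyLogicRelation kelompok kelas data (FuzzyLogicRelation kelompok kelas data)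

-- ===== LEMMAS AND PROOFS =====

-- linear specification of the binary search: first index with x < boundary, else length
def lowIdx (x : Int) : List (Int × Nat) → Nat
  | [] => 0
  | r :: rs => if x < r.1 then 0 else lowIdx x rs + 1

theorem lowIdx_le_length (x : Int) (recs : List (Int × Nat)) : lowIdx x recs ≤ recs.length := by
  induction recs with
  | nil => simp [lowIdx]
  | cons r rs ih => simp only [lowIdx, List.length_cons]; split <;> omega

theorem lowIdx_le_of_pred (x : Int) (recs : List (Int × Nat)) :
    ∀ j, j < recs.length → x < (recs.getD j (0, 0)).1 → lowIdx x recs ≤ j := by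
  induction recs with
  | nil => simp
  | cons r rs ih =>
    intro j hj hp
    cases j with
    | zero => simp_all [lowIdx]
    | succ j' =>
      simp only [lowIdx]
      split
      · omega
      · have := ih j' (by simpa using hj) (by simpa using hp); omega

theorem pred_at_lowIdx (x : Int) (recs : List (Int × Nat)) :
    lowIdx x recs < recs.length → x < (recs.getD (lowIdx x recs) (0, 0)).1 := by
  induction recs with
  | nil => simp
  | cons r rs ih =>
    simp only [lowIdx, List.length_cons]
    split
    · intro _; simpa [*]
    · intro h; simpa using ih (by omega)

theorem bsearch_inv (recs : List (Int × Nat)) (x : Int)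
    (mono : ∀ i j, i ≤ j → j < recs.length → x < (recs.getD i (0, 0)).1 → x < (recs.getD j (0, 0)).1) :
    ∀ n lo hi, hi - lo ≤ n → hi ≤ recs.length → lo ≤ lowIdx x recs → lowIdx x recs ≤ hi →
      bsearchAux recs x n lo hi = lowIdx x recs := by
  intro n
  induction n with
  | zero =>
    intro lo hi h1 _ h3 h4
    simp only [bsearchAux]
    omega
  | succ n ih =>
    intro lo hi h1 h2 h3 h4
    simp only [bsearchAux]
    split
    · rename_i hlt
      split
      · rename_i hp
        exact ih lo ((lo + hi) / 2) (by omega) (by omega)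
          h3 (lowIdx_le_of_pred x recs _ (by omega) hp)
      · rename_i hp
        refine ih ((lo + hi) / 2 + 1) hi (by omega) h2 ?_ h4
        by_contra hc
        push Not at hc
        exact hp (mono (lowIdx x recs) ((lo + hi) / 2) (by omega) (by omega)
          (pred_at_lowIdx x recs (by omega)))
    · omega

theorem bsearch_eq_lowIdx (recs : List (Int × Nat)) (x : Int)
    (hpw : List.Pairwise (fun a b => a.1 < b.1) recs) :
    bsearch recs x 0 recs.length = lowIdx x recs := by
  have mono : ∀ i j, i ≤ j → j < recs.length → x < (recs.getD i (0, 0)).1 → x < (recs.getD j (0, 0)).1 := by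
    intro i j hij hj hp
    rcases Nat.lt_or_ge i j with h | h
    · have hi : i < recs.length := by omega
      have := (List.pairwise_iff_getElem.mp hpw) i j hi hj h
      rw [List.getD_eq_getElem?_getD, List.getElem?_eq_getElem hi] at hp
      rw [List.getD_eq_getElem?_getD, List.getElem?_eq_getElem hj]
      simp only [Option.getD_some] at hp ⊢
      omega
    · have : i = j := by omega
      subst this; exact hp
  exact bsearch_inv recs x mono (recs.length - 0) 0 recs.length (by omega) le_rfl
    (by omega) (lowIdx_le_length x recs)

theorem recordsGo_pairwise (ks : List Int) : ∀ (i : Nat) (best : Option Int),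
    List.Pairwise (fun a b => a.1 < b.1) (recordsGo ks i best) ∧
    (∀ r ∈ recordsGo ks i best, ∀ b, best = some b → b < r.1) := by
  induction ks with
  | nil => intro i best; simp [recordsGo]
  | cons k ks' ih =>
    intro i best
    cases best with
    | none =>
      simp only [recordsGo]
      obtain ⟨hpw, hlb⟩ := ih (i + 1) (some k)
      refine ⟨List.pairwise_cons.mpr ⟨fun r hr => hlb r hr k rfl, hpw⟩, by simp⟩
    | some b =>
      simp only [recordsGo]
      split
      · rename_i hbk
        obtain ⟨hpw, hlb⟩ := ih (i + 1) (some k)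
        refine ⟨List.pairwise_cons.mpr ⟨fun r hr => hlb r hr k rfl, hpw⟩, ?_⟩
        intro r hr b' hb'
        injection hb' with hbe; subst hbe
        rcases List.mem_cons.mp hr with h | h
        · subst h; exact hbk
        · exact lt_trans hbk (hlb r h k rfl)
      · rename_i hbk
        obtain ⟨hpw, hlb⟩ := ih (i + 1) (some b)
        exact ⟨hpw, fun r hr b' hb' => hlb r hr b' hb'⟩

theorem firstIdxA_link (ks : List Int) : ∀ (i : Nat) (best : Option Int) (x : Int),
    (∀ b, best = some b → b ≤ x) →
    firstIdxA x ks i = ((recordsGo ks i best)[lowIdx x (recordsGo ks i best)]?).map (·.2) := by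
  induction ks with
  | nil => intro i best x _; simp [firstIdxA, recordsGo, lowIdx]
  | cons k ks' ih =>
    intro i best x hb
    cases best with
    | none =>
      simp only [firstIdxA, recordsGo]
      by_cases hx : x < k
      · simp [lowIdx, hx]
      · simp only [if_neg hx, lowIdx, List.getElem?_cons_succ]
        exact ih (i + 1) (some k) x (fun b hbk => by injection hbk with h; omega)
    | some b =>
      have hbx : b ≤ x := hb b rfl
      simp only [recordsGo]
      split
      · simp only [firstIdxA]
        by_cases hx : x < k
        · simp [lowIdx, hx]
        · simp only [if_neg hx, lowIdx, List.getElem?_cons_succ]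
          exact ih (i + 1) (some k) x (fun b' hbk => by injection hbk with h; omega)
      · rename_i hbk
        have hx : ¬ x < k := by omega
        simp only [firstIdxA, if_neg hx]
        exact ih (i + 1) (some b) x (fun b' hbe => by injection hbe with h; omega)

-- ===== VERDICT (by name: the statement is the Claim_ definition above) =====
theorem FuzzyLogicRelation_spec : Claim_equal_FuzzyLogicRelation := by
  intro kelompok kelas data _hdom _hpre
  unfold Spec_FuzzyLogicRelation FuzzyLogicRelation FuzzyLogicRelation_alt
  have hstep : (fun (l : List String) (nilai : Int) =>
      match firstIdxA nilai kelompok 0 with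
      | none => l
      | some i => l ++ [kelas.getD i ""]) =
      (fun (l : List String) (nilai : Int) =>
        let lo := bsearch (buildRecords kelompok) nilai 0 (buildRecords kelompok).length
        if lo < (buildRecords kelompok).length then
          l ++ [kelas.getD ((buildRecords kelompok).getD lo (0, 0)).2 ""]
        else l) := by
    funext l nilai
    have hpw := (recordsGo_pairwise kelompok 0 none).1
    have hbs : bsearch (buildRecords kelompok) nilai 0 (buildRecords kelompok).length
        = lowIdx nilai (buildRecords kelompok) := bsearch_eq_lowIdx _ _ hpw
    have hlink := firstIdxA_link kelompok 0 none nilai (fun _ h => by cases h)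
    simp only [buildRecords] at *
    rw [hlink, hbs]
    by_cases hlt : lowIdx nilai (recordsGo kelompok 0 none) < (recordsGo kelompok 0 none).length
    · rw [if_pos hlt]
      simp [List.getElem?_eq_getElem hlt, List.getD_eq_getElem?_getD]
    · rw [if_neg hlt, List.getElem?_eq_none (by omega)]
      simp
  simp only [hstep]
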